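-- pv_equiv track=rewrite | github.com/hiagokinlevi/iam-audit-lab | analyzers/scp_analyzer.py | _deny_covers_action
-- ===== SOURCE A (Python) =====
-- from typing import Any, Dict, List, Optional
--
-- def _deny_covers_action(deny_actions: List[str], target_actions: set) -> bool:
--     """Return True if any deny action covers any target action."""
--     deny_lower = {a.lower() for a in deny_actions}
--     for ta in target_actions:
--         if ta.lower() in deny_lower or "*" in deny_lower:
--             return True
--         # prefix wildcard: e.g. "cloudtrail:*" covers "cloudtrail:DeleteTrail"
--         prefix = ta.split(":")[0].lower() + ":*"
--         if prefix in deny_lower: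
--             return True
--     return False
-- ===== SOURCE B (Python) =====
-- from typing import List
--
-- def _deny_covers_action(deny_actions: List[str], target_actions: set) -> bool:
--     """Return True if any deny action covers any target action."""
--     if not target_actions:
--         return False
--     target_lower = {ta.lower() for ta in target_actions}
--     target_prefixes = {ta.split(":")[0].lower() + ":*" for ta in target_actions}
--     return any(
--         d == "*" or d in target_lower or d in target_prefixes
--         for d in (a.lower() for a in deny_actions)
--     )
-- ===== Notes on version B (the rewrite author's own statement) =====
-- stated objective: alternative
-- what changed: Inverted traversal: B indexes the targets (two precomputed sets of lowered names and prefix wildcards) and scans the deny list once, instead of A's per-target scan against a deny set; an early empty-target return keeps the '*' case identical.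
import Mathlib
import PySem

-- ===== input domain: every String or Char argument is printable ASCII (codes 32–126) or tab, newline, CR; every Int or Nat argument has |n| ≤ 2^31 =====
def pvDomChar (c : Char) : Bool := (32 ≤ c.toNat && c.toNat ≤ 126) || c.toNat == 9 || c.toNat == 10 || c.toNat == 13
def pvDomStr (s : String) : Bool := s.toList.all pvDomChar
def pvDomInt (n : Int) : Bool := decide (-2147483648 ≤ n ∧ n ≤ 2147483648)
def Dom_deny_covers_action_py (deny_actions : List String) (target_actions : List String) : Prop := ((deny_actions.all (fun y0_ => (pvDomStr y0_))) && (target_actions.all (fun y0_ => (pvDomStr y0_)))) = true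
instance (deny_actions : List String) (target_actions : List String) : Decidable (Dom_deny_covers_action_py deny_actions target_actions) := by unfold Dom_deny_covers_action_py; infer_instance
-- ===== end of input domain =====

-- B inverts A's traversal: it precomputes two sets from the targets (lowered names and
-- prefix wildcards) and scans the deny list once; same cost, alternative decomposition.


-- ===== PORT A =====
-- ta.split(":")[0].lower() + ":*"  (split(":") is always nonempty, so [0] never raises)
def pvActPrefix (ta : String) : String :=
  PySem.Str.lower (((PySem.Str.split? ta ":").getD []).headD "") ++ ":*"

-- the 'for ta in target_actions' loop with its early returns
def pvDenyLoopA (deny_lower : PySem.Set String) : List String → Bool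
  | [] => false
  | ta :: rest =>
    if PySem.Set.contains deny_lower (PySem.Str.lower ta) || PySem.Set.contains deny_lower "*" then
      true
    else if PySem.Set.contains deny_lower (pvActPrefix ta) then
      true
    else
      pvDenyLoopA deny_lower rest

def deny_covers_action_py (deny_actions : List String) (target_actions : List String) : Bool :=
  let deny_lower : PySem.Set String := PySem.Set.ofList (deny_actions.map PySem.Str.lower)
  pvDenyLoopA deny_lower target_actions

-- ===== PORT B =====
def deny_covers_action_py_alt (deny_actions : List String) (target_actions : List String) : Bool :=
  if target_actions.isEmpty then false
  else
    let target_lower : PySem.Set String := PySem.Set.ofList (target_actions.map PySem.Str.lower)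
    let target_prefixes : PySem.Set String := PySem.Set.ofList (target_actions.map pvActPrefix)
    deny_actions.any (fun a =>
      let d := PySem.Str.lower a
      d == "*" || PySem.Set.contains target_lower d || PySem.Set.contains target_prefixes d)

-- ===== PRECONDITION & SPEC =====
def Spec_deny_covers_action_py (deny_actions : List String) (target_actions : List String) (out : Bool) : Prop := out = deny_covers_action_py_alt deny_actions target_actions
instance (deny_actions : List String) (target_actions : List String) (out : Bool) : Decidable (Spec_deny_covers_action_py deny_actions target_actions out) := by unfold Spec_deny_covers_action_py; infer_instance

-- ===== CLAIM (what is proved, stated in full; the proofs are below) =====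
def Claim_equal_deny_covers_action_py : Prop := ∀ (deny_actions : List String) (target_actions : List String), Dom_deny_covers_action_py deny_actions target_actions → Spec_deny_covers_action_py deny_actions target_actions (deny_covers_action_py deny_actions target_actions)

-- ===== LEMMAS AND PROOFS =====

theorem pvDenyLoopA_eq_true_iff (s : PySem.Set String) (ts : List String) :
    pvDenyLoopA s ts = true ↔
      ∃ ta ∈ ts, PySem.Str.lower ta ∈ s ∨ "*" ∈ s ∨ pvActPrefix ta ∈ s := by
  induction ts with
  | nil => simp [pvDenyLoopA]
  | cons ta rest ih =>
    simp only [pvDenyLoopA]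
    split_ifs with h1 h2
    · simp only [Bool.or_eq_true, PySem.Set.contains_iff] at h1
      simp only [true_iff, List.mem_cons]
      exact ⟨ta, Or.inl rfl, h1.elim Or.inl (fun h => Or.inr (Or.inl h))⟩
    · rw [PySem.Set.contains_iff] at h2
      simp only [true_iff, List.mem_cons]
      exact ⟨ta, Or.inl rfl, Or.inr (Or.inr h2)⟩
    · rw [ih]
      simp only [Bool.or_eq_true, PySem.Set.contains_iff] at h1 h2
      rw [not_or] at h1
      constructor
      · rintro ⟨x, hx, hP⟩; exact ⟨x, List.mem_cons_of_mem _ hx, hP⟩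
      · rintro ⟨x, hx, hP⟩
        rcases List.mem_cons.mp hx with rfl | hx'
        · rcases hP with h | h | h
          · exact absurd h h1.1
          · exact absurd h h1.2
          · exact absurd h h2
        · exact ⟨x, hx', hP⟩

theorem deny_covers_action_py_eq_true_iff (deny ts : List String) :
    deny_covers_action_py deny ts = true ↔
      ∃ ta ∈ ts, ∃ a ∈ deny,
        PySem.Str.lower a = PySem.Str.lower ta ∨ PySem.Str.lower a = "*" ∨
          PySem.Str.lower a = pvActPrefix ta := by
  unfold deny_covers_action_py
  rw [pvDenyLoopA_eq_true_iff]
  constructor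
  · rintro ⟨ta, hta, h⟩
    rcases h with h | h | h <;>
      simp only [PySem.Set.mem_ofList, List.mem_map] at h <;>
      obtain ⟨a, ha, hEq⟩ := h
    · exact ⟨ta, hta, a, ha, Or.inl hEq⟩
    · exact ⟨ta, hta, a, ha, Or.inr (Or.inl hEq)⟩
    · exact ⟨ta, hta, a, ha, Or.inr (Or.inr hEq)⟩
  · rintro ⟨ta, hta, a, ha, h⟩
    refine ⟨ta, hta, ?_⟩
    rcases h with h | h | h
    · exact Or.inl ((PySem.Set.mem_ofList _ _).mpr (List.mem_map.mpr ⟨a, ha, h⟩))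
    · exact Or.inr (Or.inl ((PySem.Set.mem_ofList _ _).mpr (List.mem_map.mpr ⟨a, ha, h⟩)))
    · exact Or.inr (Or.inr ((PySem.Set.mem_ofList _ _).mpr (List.mem_map.mpr ⟨a, ha, h⟩)))

theorem deny_covers_action_py_alt_eq_true_iff (deny ts : List String) :
    deny_covers_action_py_alt deny ts = true ↔
      ts ≠ [] ∧ ∃ a ∈ deny,
        PySem.Str.lower a = "*" ∨ PySem.Str.lower a ∈ ts.map PySem.Str.lower ∨
          PySem.Str.lower a ∈ ts.map pvActPrefix := by
  unfold deny_covers_action_py_alt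
  split_ifs with h
  · simp [List.isEmpty_iff.mp h]
  · have hne : ts ≠ [] := fun hnil => h (by simp [hnil])
    simp only [hne, ne_eq, not_false_iff, true_and, List.any_eq_true,
      Bool.or_eq_true, beq_iff_eq, PySem.Set.contains_eq_listContains,
      List.contains_eq_mem, decide_eq_true_eq, PySem.Set.mem_ofList]
    constructor <;> rintro ⟨a, ha, hP⟩ <;> exact ⟨a, ha, by tauto⟩

-- ===== VERDICT (by name: the statement is the Claim_ definition above) =====
theorem deny_covers_action_py_spec : Claim_equal_deny_covers_action_py := by
  intro deny ts _
  unfold Spec_deny_covers_action_py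
  rw [Bool.eq_iff_iff, deny_covers_action_py_eq_true_iff, deny_covers_action_py_alt_eq_true_iff]
  constructor
  · rintro ⟨ta, hta, a, ha, h⟩
    refine ⟨List.ne_nil_of_mem hta, a, ha, ?_⟩
    rcases h with h | h | h
    · exact Or.inr (Or.inl (h ▸ List.mem_map_of_mem (f := PySem.Str.lower) hta))
    · exact Or.inl h
    · exact Or.inr (Or.inr (h ▸ List.mem_map_of_mem (f := pvActPrefix) hta))
  · rintro ⟨hne, a, ha, h⟩
    rcases h with h | h | h
    · obtain ⟨ta, hta⟩ := List.exists_mem_of_ne_nil ts hne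
      exact ⟨ta, hta, a, ha, Or.inr (Or.inl h)⟩
    · obtain ⟨ta, hta, hEq⟩ := List.mem_map.mp h
      exact ⟨ta, hta, a, ha, Or.inl hEq.symm⟩
    · obtain ⟨ta, hta, hEq⟩ := List.mem_map.mp h
      exact ⟨ta, hta, a, ha, Or.inr (Or.inr hEq.symm)⟩
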